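-- pv_equiv track=rewrite | github.com/MariiaKandaurova/AOIS | AOIS_LW2/main.py | find_skcnf
-- ===== SOURCE A (Python) =====
-- def to_reverse_polish(expression):
--     precedence = {"!": 4, "&": 3, "|": 3, "~": 2, ">": 1}
--     associative = {"!": "R", "&": "L", "|": "L", "~": "L", ">": "R"}
--     output = []
--     operators = []
--     i = 0
--     while i < len(expression):
--         individual_char = expression[i]
--         if individual_char.isalpha():
--             output.append(individual_char)
--         elif individual_char in precedence:
--             while (
--                 operators
--                 and operators[-1] != "("
--                 and (
--                     precedence[operators[-1]] > precedence[individual_char]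
--                     or (
--                         precedence[operators[-1]] == precedence[individual_char]
--                         and associative[individual_char] == "L"
--                     )
--                 )
--             ):
--                 output.append(operators.pop())
--             operators.append(individual_char)
--         elif individual_char == "(":
--             operators.append(individual_char)
--         elif individual_char == ")":
--             while operators and operators[-1] != "(":
--                 output.append(operators.pop())
--             operators.pop()
--         i += 1
--     while operators:
--         output.append(operators.pop())
--     return " ".join(output)
--
-- def evaluate_expression(expression):
--     reverse_polish = to_reverse_polish(expression)
--     sorted_alphabet_set = sorted(set(filter(str.isalpha, expression)))
--     alphabet_set_list_length = len(sorted_alphabet_set)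
--     outcome_vals = []
--
--     for i in range(2**alphabet_set_list_length):
--         number_collection = [(i >> j) & 1 for j in range(alphabet_set_list_length - 1, -1, -1)]
--         value = evaluate_reverse_polish_expression(reverse_polish.split(), number_collection, sorted_alphabet_set)
--         outcome_vals.append(value)
--
--     return outcome_vals
--
-- def find_skcnf(expression):
--     outcome_vals = evaluate_expression(expression)
--     sorted_alphabet_set = sorted(set(filter(str.isalpha, expression)))
--     alphabet_set_list_length = len(sorted_alphabet_set)
--     skcnf = []
--     for i, outcome_val in enumerate(outcome_vals):
--         if outcome_val == 0:
--             terms = []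
--             binary_number_collection = format(i, f"0{alphabet_set_list_length}b")
--             for j, value in enumerate(binary_number_collection):
--                 if value == "1":
--                     terms.append(f"!{sorted_alphabet_set[j]}")
--                 else:
--                     terms.append(sorted_alphabet_set[j])
--             skcnf.append(f"({' | '.join(terms)})")
--
--     return " & ".join(skcnf) if skcnf else "1"
--
-- def evaluate_reverse_polish_expression(reverse_polish, number_collection, sorted_alphabet_set):
--     data_stack = []
--     for token in reverse_polish:
--         if token == "!":
--             operand = data_stack.pop()
--             outcome_val = int(not operand)
--             data_stack.append(outcome_val)
--         elif token in ["&", "|", "~", ">"]: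
--             b = data_stack.pop()
--             a = data_stack.pop()
--             if token == "&":
--                 outcome_val = a & b
--             elif token == "|":
--                 outcome_val = a | b
--             elif token == "~":
--                 outcome_val = int((a and b) or (not a and not b))
--             elif token == ">":
--                 outcome_val = int((not a) or b)
--             data_stack.append(outcome_val)
--         elif token.isalpha():
--             if token in sorted_alphabet_set:
--                 index = sorted_alphabet_set.index(token)
--                 data_stack.append(number_collection[index])
--             else:
--                 raise ValueError(
--                     f"Unexpected token '{token}' not found in sorted_alphabet_set"
--                 )
--     return data_stack.pop() if data_stack else 0
-- ===== SOURCE B (Python) =====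
-- # B: vectorized truth-table evaluation -- the postfix is run ONCE over bitmask
-- # integers (one bit per truth-table row), replacing A's per-row RPN-string
-- # split + scalar stack-machine loop; clauses are read straight off the bits.
--
-- def _prec(c):
--     return 4 if c == "!" else 3 if c in "&|" else 2 if c == "~" else 1
--
--
-- def _postfix(expression):
--     post = []
--     pending = []
--     for ch in expression:
--         if ch.isalpha():
--             post.append(ch)
--         elif ch in "!&|~>":
--             # pop while the top binds at least as tightly; right-associative
--             # operators ('!' and '>') do not pop equal precedence
--             threshold = 2 * _prec(ch) + (ch in "!>")
--             while pending:
--                 top = pending[-1]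
--                 if top == "(" or 2 * _prec(top) < threshold:
--                     break
--                 post.append(pending.pop())
--             pending.append(ch)
--         elif ch == "(":
--             pending.append(ch)
--         elif ch == ")":
--             while pending:
--                 top = pending.pop()
--                 if top == "(":
--                     break
--                 post.append(top)
--     post.extend(reversed(pending))
--     return post
--
--
-- def find_skcnf(expression):
--     variables = sorted(set(filter(str.isalpha, expression)))
--     nv = len(variables)
--     rows = 1 << nv
--     full = (1 << rows) - 1
--     # column mask per variable name: bit i is that variable's value in row i
--     cols = {}
--     for k, v in enumerate(variables):
--         mask = 0
--         for row in range(rows):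
--             if (row >> (nv - 1 - k)) & 1:
--                 mask |= 1 << row
--         cols[v] = mask
--     # one pass over the postfix, on whole-table bitmasks
--     stk = []
--     for tkn in _postfix(expression):
--         if tkn == "!":
--             stk.append(full ^ stk.pop())
--         elif tkn in "&|~>":
--             y = stk.pop()
--             x = stk.pop()
--             if tkn == "&":
--                 stk.append(x & y)
--             elif tkn == "|":
--                 stk.append(x | y)
--             elif tkn == "~":
--                 stk.append(full ^ (x ^ y))
--             else:
--                 stk.append((full ^ x) | y)
--         elif tkn.isalpha():
--             stk.append(cols[tkn])
--     table = stk.pop() if stk else 0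
--     clauses = [
--         "(" + " | ".join("!" + v if (row >> (nv - 1 - k)) & 1 else v
--                          for k, v in enumerate(variables)) + ")"
--         for row in range(rows)
--         if (table >> row) & 1 == 0
--     ]
--     return " & ".join(clauses) if clauses else "1"
-- ===== Notes on version B (the rewrite author's own statement) =====
-- stated objective: faster
-- what changed: B shunts once to a postfix token list and evaluates it a single time over whole-truth-table bitmask integers (one bit per row; each variable is a precomputed column mask looked up in a dict; each operator is one bitwise op), then reads the zero rows straight off the table's bits with a filter/comprehension — replacing A's per-row RPN-string join/split plus scalar stack-machine evaluation and format()-based clause building.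
import Mathlib
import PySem

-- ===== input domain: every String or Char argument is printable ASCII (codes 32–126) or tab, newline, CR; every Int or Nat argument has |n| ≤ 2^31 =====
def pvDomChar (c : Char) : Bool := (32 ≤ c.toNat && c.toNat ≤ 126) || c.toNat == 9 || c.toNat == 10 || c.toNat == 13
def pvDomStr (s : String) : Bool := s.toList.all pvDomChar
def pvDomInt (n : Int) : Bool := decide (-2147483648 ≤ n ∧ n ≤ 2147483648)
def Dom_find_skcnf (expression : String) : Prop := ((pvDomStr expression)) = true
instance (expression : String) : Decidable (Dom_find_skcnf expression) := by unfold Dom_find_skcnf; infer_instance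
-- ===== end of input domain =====

-- B evaluates the postfix ONCE over whole-truth-table bitmask integers (one bit per row)
-- instead of A's per-row RPN-string split + scalar stack machine (objective: faster — the
-- timing run measured B well over 1.5x faster at the largest size). Return value only.

-- ===== PORT A =====
-- Python lists used as stacks ("append"/"pop" at the right end) are ported with the HEAD as the
-- top of the stack; Python's 1-character strings (the characters of `expression`) are ported as
-- `Char`, an arbitrary token string as `List Char`.

-- precedence = {"!": 4, "&": 3, "|": 3, "~": 2, ">": 1}, looked up only on its five keys (exact there)
def pvPrecA (c : Char) : Nat :=
  if c = '!' then 4 else if c = '&' then 3 else if c = '|' then 3 else if c = '~' then 2 else 1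

-- `individual_char in precedence`
def pvInPrecA (c : Char) : Bool := c = '!' || c = '&' || c = '|' || c = '~' || c = '>'

-- `associative[individual_char] == "L"` ("R" exactly for '!' and '>'; looked up only on the five keys)
def pvAssocLA (c : Char) : Bool := !(c = '!' || c = '>')

-- the inner `while` that pops operators to the output before pushing `c`
def pvPopOpsA (c : Char) : List Char → List Char → List Char × List Char
  | out, [] => (out, [])
  | out, t :: rest =>
    if t ≠ '(' ∧ (pvPrecA c < pvPrecA t ∨ (pvPrecA t = pvPrecA c ∧ pvAssocLA c = true)) then
      pvPopOpsA c (out ++ [t]) rest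
    else (out, t :: rest)

-- the `while` run at ')' popping down to the '('
def pvCloseParenA : List Char → List Char → List Char × List Char
  | out, [] => (out, [])
  | out, t :: rest =>
    if t ≠ '(' then pvCloseParenA (out ++ [t]) rest else (out, t :: rest)

-- the main `while i < len(expression)` scan of to_reverse_polish
def pvShuntA : List Char → List Char → List Char → List Char × List Char
  | [], out, operators => (out, operators)
  | c :: rest, out, operators =>
    if PySem.Chars.isalpha c then pvShuntA rest (out ++ [c]) operators
    else if pvInPrecA c then
      let p := pvPopOpsA c out operators
      pvShuntA rest p.1 (c :: p.2)
    else if c = '(' then pvShuntA rest out ('(' :: operators)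
    else if c = ')' then
      let p := pvCloseParenA out operators
      -- `operators.pop()`: IndexError on an empty stack (outside Pre_); dropping the head is the pop
      pvShuntA rest p.1 (p.2.drop 1)
    else pvShuntA rest out operators

-- to_reverse_polish: final drain of the operator stack, then `" ".join(output)`
def pvToRpA (expression : String) : String :=
  let p := pvShuntA expression.toList [] []
  PySem.Str.join " " ((p.1 ++ p.2).map (fun c => String.ofList [c]))

-- sorted(set(filter(str.isalpha, expression)))
def pvVarsA (expression : String) : List Char :=
  PySem.List.sorted (PySem.Set.ofList (expression.toList.filter PySem.Chars.isalpha)) (fun x => x) false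

-- one token of evaluate_reverse_polish_expression's loop
-- (`data_stack.pop()` on an empty stack is IndexError, outside Pre_: the port leaves the stack;
--  the ValueError branch for an alpha token outside sorted_alphabet_set is unreachable: every
--  alpha token of the RPN is a character of `expression`)
def pvEvalStepA (vars : List Char) (number_collection : List Int) (data_stack : List Int)
    (t : List Char) : List Int :=
  if t = ['!'] then
    match data_stack with
    | [] => data_stack
    | operand :: rest => (if operand = 0 then (1 : Int) else 0) :: rest
  else if t = ['&'] ∨ t = ['|'] ∨ t = ['~'] ∨ t = ['>'] then
    match data_stack with
    | b :: a :: rest =>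
      (if t = ['&'] then PySem.Int.band a b
       else if t = ['|'] then PySem.Int.bor a b
       else if t = ['~'] then
         -- int((a and b) or (not a and not b))
         let t1 : Int := if a = 0 then a else b
         if t1 ≠ 0 then t1 else if a = 0 ∧ b = 0 then 1 else 0
       else
         -- int((not a) or b)
         if a = 0 then 1 else b) :: rest
    | _ => data_stack
  else if PySem.Chars.strIsalpha t then
    match PySem.List.index? (vars.map (fun v => [v])) t with
    | some index => PySem.List.pyGetD number_collection (index : Int) 0 :: data_stack
    | none => data_stack
  else data_stack

-- evaluate_reverse_polish_expression; `data_stack.pop() if data_stack else 0` at the end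
def pvEvalRpnA (reverse_polish : List (List Char)) (number_collection : List Int)
    (vars : List Char) : Int :=
  match reverse_polish.foldl (pvEvalStepA vars number_collection) [] with
  | [] => 0
  | x :: _ => x

-- evaluate_expression
def pvEvalExprA (expression : String) : List Int :=
  let reverse_polish := pvToRpA expression
  let sorted_alphabet_set := pvVarsA expression
  let n := sorted_alphabet_set.length
  (PySem.List.pyRange 0 ((2 : Int) ^ n) 1).map (fun i =>
    -- [(i >> j) & 1 for j in range(n - 1, -1, -1)]; every j produced is ≥ 0, so `.toNat` is exact
    let number_collection := (PySem.List.pyRange ((n : Int) - 1) (-1) (-1)).map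
      (fun j => PySem.Int.band (i >>> j.toNat) 1)
    pvEvalRpnA ((PySem.Str.split₀ reverse_polish).map String.toList) number_collection
      sorted_alphabet_set)

def find_skcnf (expression : String) : String :=
  let outcome_vals := pvEvalExprA expression
  let sorted_alphabet_set := pvVarsA expression
  let n := sorted_alphabet_set.length
  let skcnf := (PySem.List.enumerate outcome_vals 0).foldl (fun acc iv =>
    if iv.2 = 0 then
      -- format(i, f"0{n}b") for i ≥ 0 is the binary digits zero-padded to width n
      let binary := PySem.Chars.zfill (PySem.Int.toBinChars iv.1) ((n : Int))
      -- sorted_alphabet_set[j]: IndexError when there is no variable at j (outside Pre_)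
      let terms := (PySem.List.enumerate binary 0).map (fun jv =>
        if jv.2 = '1' then '!' :: [PySem.List.pyGetD sorted_alphabet_set jv.1 ' ']
        else [PySem.List.pyGetD sorted_alphabet_set jv.1 ' '])
      acc ++ [['('] ++ PySem.Chars.join (' ' :: '|' :: [' ']) terms ++ [')']]
    else acc) []
  if skcnf = [] then "1" else String.ofList (PySem.Chars.join (' ' :: '&' :: [' ']) skcnf)

-- ===== PORT B =====

-- _prec: 4 if c == "!" else 3 if c in "&|" else 2 if c == "~" else 1
def pvPrecB (c : Char) : Nat :=
  if c = '!' then 4 else if ['&', '|'].contains c then 3 else if c = '~' then 2 else 1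

-- threshold = 2 * _prec(ch) + (ch in "!>")
def pvThreshB (c : Char) : Nat := 2 * pvPrecB c + (if c = '!' ∨ c = '>' then 1 else 0)

-- `while pending: top = pending[-1]; if top == "(" or 2 * _prec(top) < threshold: break; post.append(pending.pop())`
def pvPopLeB (th : Nat) (st : List Char × List Char) : List Char × List Char :=
  match st with
  | (post, []) => (post, [])
  | (post, top :: more) =>
    if top = '(' ∨ 2 * pvPrecB top < th then (post, top :: more)
    else pvPopLeB th (post ++ [top], more)
  termination_by st.2.length

-- `while pending: top = pending.pop(); if top == "(": break; post.append(top)`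
def pvCloseB (st : List Char × List Char) : List Char × List Char :=
  match st with
  | (post, []) => (post, [])
  | (post, top :: more) =>
    if top = '(' then (post, more) else pvCloseB (post ++ [top], more)
  termination_by st.2.length

-- the body of `for ch in expression` as one fold step over the state (post, pending)
def pvScanStepB (st : List Char × List Char) (ch : Char) : List Char × List Char :=
  if PySem.Chars.isalpha ch then (st.1 ++ [ch], st.2)
  else if ['!', '&', '|', '~', '>'].contains ch then
    let p := pvPopLeB (pvThreshB ch) st
    (p.1, ch :: p.2)
  else if ch = '(' then (st.1, '(' :: st.2)
  else if ch = ')' then pvCloseB st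
  else st

-- _postfix: fold the scan step, then `post.extend(reversed(pending))` (top of stack first)
def pvPostfixB (expr : List Char) : List Char :=
  let p := expr.foldl pvScanStepB ([], [])
  p.1 ++ p.2

-- column mask of variable k: `for i in range(rows): if (i >> (nv-1-k)) & 1: mask |= 1 << i`
def pvColB (nv rows k : Nat) : Nat :=
  Nat.fold rows
    (fun row _ mask => if (row >>> (nv - 1 - k)) &&& 1 = 1 then mask ||| (1 <<< row) else mask) 0

-- one token of the vectorized stack machine (pops on a too-short stack raise outside Pre_:
-- the port leaves the stack; `cols[top]` never raises KeyError: top is a letter of `expression`)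
def pvMaskStepB (full : Nat) (cols : PySem.Dict Char Nat) (stk : List Nat)
    (tkn : Char) : List Nat :=
  if tkn = '!' then
    match stk with
    | x :: rr => (full ^^^ x) :: rr
    | [] => stk
  else if ['&', '|', '~', '>'].contains tkn then
    match stk with
    | y :: x :: rr =>
      (if tkn = '&' then x &&& y
       else if tkn = '|' then x ||| y
       else if tkn = '~' then full ^^^ (x ^^^ y)
       else (full ^^^ x) ||| y) :: rr
    | _ => stk
  else if PySem.Chars.isalpha tkn then
    match cols.get? tkn with
    | some m => m :: stk
    | none => stk
  else stk

def find_skcnf_alt (expression : String) : String :=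
  -- sorted(set(filter(str.isalpha, expression)))
  let vs := PySem.List.sorted
    (PySem.Set.ofList (expression.toList.filter PySem.Chars.isalpha)) (fun x => x) false
  let nv := vs.length
  let rows := 1 <<< nv
  let full := (1 <<< rows) - 1
  let cols := vs.zipIdx.foldl
    (fun d vk => d.insert vk.1 (pvColB nv rows vk.2)) PySem.Dict.empty
  -- `table = stack.pop() if stack else 0`
  let table := match (pvPostfixB expression.toList).foldl (pvMaskStepB full cols) [] with
    | [] => 0
    | x :: _ => x
  let clauses := ((List.range rows).filter (fun row => (table >>> row) &&& 1 = 0)).map (fun row =>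
    ['('] ++ List.intercalate (' ' :: '|' :: [' '])
      (vs.zipIdx.map (fun vk =>
        if (row >>> (nv - 1 - vk.2)) &&& 1 = 1 then '!' :: [vk.1] else [vk.1])) ++ [')'])
  if clauses = [] then "1"
  else String.ofList (List.intercalate (' ' :: '&' :: [' ']) clauses)

-- ===== PRECONDITION & SPEC =====
-- Pre_ admits exactly the inputs on which the Python A returns: the expression has at least one
-- letter (otherwise the clause of an all-false row indexes an empty variable list: IndexError),
-- every ')' finds an open '(' (otherwise `operators.pop()` on an empty list: IndexError), and each
-- operator, at the moment it is emitted, has its operands (otherwise `data_stack.pop()` on an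
-- empty list: IndexError). The last two are phrased by the arity/balance discipline below, which
-- only counts operands and never computes any value.

def pvPrecP (c : Char) : Nat :=
  if c = '!' then 4 else if c = '&' ∨ c = '|' then 3 else if c = '~' then 2 else 1

def pvIsOpP (c : Char) : Bool := c = '!' || c = '&' || c = '|' || c = '~' || c = '>'

-- emitting token t on top of `cnt` available operands: '(' is inert, '!' keeps the count
-- (needs one operand), a binary operator consumes two and yields one
def pvUseP (cnt : Nat) (t : Char) : Option Nat :=
  if t = '(' then some cnt
  else if t = '!' then (if 1 ≤ cnt then some cnt else none)
  else if 2 ≤ cnt then some (cnt - 1) else none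

def pvPopsP (c : Char) : List Char → Nat → Option (List Char × Nat)
  | [], cnt => some ([], cnt)
  | t :: rest, cnt =>
    if t ≠ '(' ∧ (pvPrecP c < pvPrecP t ∨ (pvPrecP t = pvPrecP c ∧ ¬(c = '!' ∨ c = '>'))) then
      match pvUseP cnt t with
      | some cnt' => pvPopsP c rest cnt'
      | none => none
    else some (t :: rest, cnt)

def pvCloseP : List Char → Nat → Option (List Char × Nat)
  | [], _ => none
  | t :: rest, cnt =>
    if t = '(' then some (rest, cnt)
    else
      match pvUseP cnt t with
      | some cnt' => pvCloseP rest cnt'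
      | none => none

def pvDrainP : List Char → Nat → Bool
  | [], _ => true
  | t :: rest, cnt =>
    match pvUseP cnt t with
    | some cnt' => pvDrainP rest cnt'
    | none => false

def pvWfP : List Char → List Char → Nat → Bool
  | [], ops, cnt => pvDrainP ops cnt
  | c :: rest, ops, cnt =>
    if PySem.Chars.isalpha c then pvWfP rest ops (cnt + 1)
    else if pvIsOpP c then
      match pvPopsP c ops cnt with
      | some p => pvWfP rest (c :: p.1) p.2
      | none => false
    else if c = '(' then pvWfP rest ('(' :: ops) cnt
    else if c = ')' then
      match pvCloseP ops cnt with
      | some p => pvWfP rest p.1 p.2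
      | none => false
    else pvWfP rest ops cnt

def Pre_find_skcnf (expression : String) : Prop :=
  expression.toList.any PySem.Chars.isalpha = true ∧
    pvWfP expression.toList [] 0 = true

instance (expression : String) : Decidable (Pre_find_skcnf expression) := by
  unfold Pre_find_skcnf; infer_instance

def pvWitness_find_skcnf : String := "(a | !b) > a & b"

def Spec_find_skcnf (expression : String) (out : String) : Prop := out = find_skcnf_alt expression
instance (expression : String) (out : String) : Decidable (Spec_find_skcnf expression out) := by
  unfold Spec_find_skcnf; infer_instance

-- ===== CLAIM (what is proved, stated in full; the proofs are below) =====
def Claim_equal_find_skcnf : Prop := ∀ (expression : String), Dom_find_skcnf expression → Pre_find_skcnf expression → Spec_find_skcnf expression (find_skcnf expression)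

-- ===== LEMMAS AND PROOFS =====

-- ---- the two shunting yards compute the same output ----

theorem pv_contains4 (t : Char) :
    ((['&', '|', '~', '>'] : List Char).contains t) = true ↔
      (t = '&' ∨ t = '|' ∨ t = '~' ∨ t = '>') := by
  by_cases h1 : t = '&' <;> by_cases h2 : t = '|' <;> by_cases h3 : t = '~' <;>
    by_cases h4 : t = '>' <;> simp [h1, h2, h3, h4]

theorem pvPrecB_eq (c : Char) : pvPrecB c = pvPrecA c := by
  rw [pvPrecB, pvPrecA]
  by_cases h1 : c = '!' <;> by_cases h2 : c = '&' <;> by_cases h3 : c = '|' <;>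
    simp [h1, h2, h3]

theorem pvPopB_eq (c : Char) : ∀ ops out, pvPopLeB (pvThreshB c) (out, ops) = pvPopOpsA c out ops := by
  intro ops
  induction ops with
  | nil => intro out; rw [pvPopLeB, pvPopOpsA]
  | cons t rest ih =>
    intro out
    have hcond : (t = '(' ∨ 2 * pvPrecB t < pvThreshB c) ↔
        ¬(t ≠ '(' ∧ (pvPrecA c < pvPrecA t ∨ (pvPrecA t = pvPrecA c ∧ pvAssocLA c = true))) := by
      rw [pvPrecB_eq]
      by_cases ht : t = '('
      · simp [ht]
      · simp only [ht, ne_eq, not_false_eq_true, true_and, false_or]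
        by_cases hc : c = '!' ∨ c = '>'
        · have ha : pvAssocLA c = false := by
            rcases hc with h | h <;> simp [pvAssocLA, h]
          rw [pvThreshB, if_pos hc, ha, pvPrecB_eq]
          simp only [Bool.false_eq_true, and_false, or_false]
          omega
        · have ha : pvAssocLA c = true := by
            rcases not_or.mp hc with ⟨h1, h2⟩
            simp [pvAssocLA, h1, h2]
          rw [pvThreshB, if_neg hc, ha, pvPrecB_eq]
          simp only [and_true]
          omega
    rw [pvPopLeB, pvPopOpsA]
    by_cases hB : t = '(' ∨ 2 * pvPrecB t < pvThreshB c
    · rw [if_pos hB, if_neg (hcond.mp hB)]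
    · rw [if_neg hB, if_pos (by
        by_contra hA
        exact hB (hcond.mpr hA))]
      exact ih _

theorem pvCloseB_eq : ∀ ops out, pvCloseB (out, ops) =
    ((pvCloseParenA out ops).1, (pvCloseParenA out ops).2.drop 1) := by
  intro ops
  induction ops with
  | nil => intro out; rw [pvCloseB, pvCloseParenA]; rfl
  | cons t rest ih =>
    intro out
    rw [pvCloseB, pvCloseParenA]
    by_cases ht : t = '('
    · rw [if_pos ht, if_neg (by simp [ht])]
      simp
    · rw [if_neg ht, if_pos ht]
      exact ih _

theorem pvScanB_eq : ∀ cs out ops, cs.foldl pvScanStepB (out, ops) = pvShuntA cs out ops := by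
  intro cs
  induction cs with
  | nil => intro out ops; rfl
  | cons c rest ih =>
    intro out ops
    have hmem : (['!', '&', '|', '~', '>'].contains c) = pvInPrecA c := by
      by_cases h1 : c = '!' <;> by_cases h2 : c = '&' <;> by_cases h3 : c = '|' <;>
        by_cases h4 : c = '~' <;> by_cases h5 : c = '>' <;>
        simp [pvInPrecA, h1, h2, h3, h4, h5]
    rw [List.foldl_cons]
    simp only [pvScanStepB, pvShuntA, hmem, pvPopB_eq, pvCloseB_eq]
    split
    · exact ih _ _
    split
    · exact ih _ _
    split
    · exact ih _ _
    split
    · exact ih _ _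
    · exact ih _ _

-- ---- every token the shunting yard emits is a letter of the input or one of "!&|~>(" ----

def pvTokInv (P : Char → Prop) (c : Char) : Prop :=
  (PySem.Chars.isalpha c = true ∧ P c) ∨ c ∈ ['!', '&', '|', '~', '>', '(']

theorem pvPopOpsA_mem (c : Char) :
    ∀ ops out x, (x ∈ (pvPopOpsA c out ops).1 ∨ x ∈ (pvPopOpsA c out ops).2) →
      x ∈ out ∨ x ∈ ops := by
  intro ops
  induction ops with
  | nil => intro out x hx; simpa [pvPopOpsA] using hx
  | cons t rest ih =>
    intro out x hx
    simp only [pvPopOpsA] at hx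
    split at hx
    · rcases ih _ _ hx with h | h
      · rcases (by simpa using h : x ∈ out ∨ x = t) with h' | h'
        · exact Or.inl h'
        · exact Or.inr (by simp [h'])
      · exact Or.inr (by simp [h])
    · tauto

theorem pvCloseParenA_mem :
    ∀ ops out x, (x ∈ (pvCloseParenA out ops).1 ∨ x ∈ (pvCloseParenA out ops).2) →
      x ∈ out ∨ x ∈ ops := by
  intro ops
  induction ops with
  | nil => intro out x hx; simpa [pvCloseParenA] using hx
  | cons t rest ih =>
    intro out x hx
    simp only [pvCloseParenA] at hx
    split at hx
    · rcases ih _ _ hx with h | h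
      · rcases (by simpa using h : x ∈ out ∨ x = t) with h' | h'
        · exact Or.inl h'
        · exact Or.inr (by simp [h'])
      · exact Or.inr (by simp [h])
    · tauto

theorem pvShuntA_inv (P : Char → Prop) :
    ∀ cs out ops, (∀ c ∈ cs, PySem.Chars.isalpha c = true → P c) →
      (∀ c ∈ out, pvTokInv P c) → (∀ c ∈ ops, pvTokInv P c) →
      ∀ x, (x ∈ (pvShuntA cs out ops).1 ∨ x ∈ (pvShuntA cs out ops).2) → pvTokInv P x := by
  intro cs
  induction cs with
  | nil =>
    intro out ops _ hout hops x hx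
    simp only [pvShuntA] at hx
    rcases hx with h | h
    · exact hout _ h
    · exact hops _ h
  | cons d rest ih =>
    intro out ops hcs hout hops x hx
    have hcs' : ∀ c ∈ rest, PySem.Chars.isalpha c = true → P c := by
      intro c h; exact hcs c (by simp [h])
    have hd : PySem.Chars.isalpha d = true → P d := hcs d (by simp)
    simp only [pvShuntA] at hx
    split at hx
    · refine ih _ _ hcs' ?_ hops x hx
      intro c h
      rcases (by simpa using h : c ∈ out ∨ c = d) with h' | h'
      · exact hout _ h'
      · subst h'
        exact Or.inl ⟨by assumption, hd (by assumption)⟩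
    split at hx
    · rename_i halpha hop
      refine ih _ _ hcs' ?_ ?_ x hx
      · intro c h'
        rcases pvPopOpsA_mem d ops out c (Or.inl h') with h | h
        · exact hout _ h
        · exact hops _ h
      · intro c h'
        rcases (by simpa using h' : c = d ∨ c ∈ (pvPopOpsA d out ops).2) with h | h
        · subst h
          right
          simp only [pvInPrecA] at hop
          rcases (by simpa [or_assoc] using hop :
              c = '!' ∨ c = '&' ∨ c = '|' ∨ c = '~' ∨ c = '>') with
            h | h | h | h | h <;> simp [h]
        · rcases pvPopOpsA_mem d ops out c (Or.inr h) with h2 | h2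
          · exact hout _ h2
          · exact hops _ h2
    split at hx
    · refine ih _ _ hcs' hout ?_ x hx
      intro c h'
      rcases (by simpa using h' : c = '(' ∨ c ∈ ops) with h | h
      · right; simp [h]
      · exact hops _ h
    split at hx
    · refine ih _ _ hcs' ?_ ?_ x hx
      · intro c h'
        rcases pvCloseParenA_mem ops out c (Or.inl h') with h | h
        · exact hout _ h
        · exact hops _ h
      · intro c h'
        have hc2 : c ∈ (pvCloseParenA out ops).2 := List.mem_of_mem_drop h'
        rcases pvCloseParenA_mem ops out c (Or.inr hc2) with h | h
        · exact hout _ h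
        · exact hops _ h
    · exact ih _ _ hcs' hout hops x hx

-- ---- " ".join of 1-character tokens splits back into exactly those tokens ----

theorem pv_alpha_not_space (c : Char) (h : PySem.Chars.isalpha c = true) :
    PySem.Chars.isspace c = false := by
  have h2 : ('A' ≤ c ∧ c ≤ 'Z') ∨ ('a' ≤ c ∧ c ≤ 'z') := by
    simpa [PySem.Chars.isalpha, PySem.Chars.isupper, PySem.Chars.islower] using h
  have h3 : 65 ≤ c.toNat ∧ c.toNat ≤ 122 := by
    rcases h2 with ⟨ha, hb⟩ | ⟨ha, hb⟩
    · exact ⟨(show (65:Nat) ≤ c.toNat from ha), le_trans (show c.toNat ≤ 90 from hb) (by norm_num)⟩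
    · exact ⟨le_trans (by norm_num) (show (97:Nat) ≤ c.toNat from ha), (show c.toNat ≤ 122 from hb)⟩
  simp only [PySem.Chars.isspace, Bool.or_eq_false_iff, Bool.and_eq_false_iff,
    decide_eq_false_iff_not]
  omega

theorem pvTokInv_not_space (P : Char → Prop) (c : Char) (h : pvTokInv P c) :
    PySem.Chars.isspace c = false := by
  rcases h with ⟨h, _⟩ | h
  · exact pv_alpha_not_space c h
  · rcases (by simpa using h) with h | h | h | h | h | h <;> subst h <;> decide

theorem pv_split_go_nil (cur : List Char) (acc : List (List Char)) :
    PySem.Chars.split₀.go [] cur acc =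
      if cur.isEmpty then acc.reverse else (cur.reverse :: acc).reverse := rfl

theorem pv_split_go_cons (c : Char) (rest cur : List Char) (acc : List (List Char)) :
    PySem.Chars.split₀.go (c :: rest) cur acc =
      if PySem.Chars.isspace c then
        (if cur.isEmpty then PySem.Chars.split₀.go rest [] acc
         else PySem.Chars.split₀.go rest [] (cur.reverse :: acc))
      else PySem.Chars.split₀.go rest (c :: cur) acc := rfl

theorem pv_split_join_aux :
    ∀ (toks : List Char) (acc : List (List Char)),
      (∀ c ∈ toks, PySem.Chars.isspace c = false) →
      PySem.Chars.split₀.go (PySem.Chars.join [' '] (toks.map (fun c => [c]))) [] acc =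
        acc.reverse ++ toks.map (fun c => [c]) := by
  intro toks
  induction toks with
  | nil =>
    intro acc _
    simp [PySem.Chars.join_nil, pv_split_go_nil]
  | cons c rest ih =>
    intro acc h
    have hc : PySem.Chars.isspace c = false := h c (by simp)
    cases rest with
    | nil =>
      simp [PySem.Chars.join, pv_split_go_cons, pv_split_go_nil, hc, List.intercalate]
    | cons c2 rest2 =>
      have hj : PySem.Chars.join [' '] ((c :: c2 :: rest2).map (fun c => [c])) =
          c :: ' ' :: PySem.Chars.join [' '] ((c2 :: rest2).map (fun c => [c])) := by
        simpa using PySem.Chars.join_cons_cons [' '] [c] [c2] (rest2.map (fun c => [c]))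
      rw [show (c :: c2 :: rest2).map (fun c => [c]) = [c] :: (c2 :: rest2).map (fun c => [c])
        from rfl] at hj
      rw [List.map_cons, hj, pv_split_go_cons, if_neg (by simp [hc])]
      cases hjj : PySem.Chars.join [' '] ((c2 :: rest2).map (fun c => [c])) with
      | nil =>
        exfalso
        cases rest2 <;> simp [PySem.Chars.join, List.intercalate] at hjj
      | cons y ys =>
        rw [pv_split_go_cons, if_pos (by decide), if_neg (by simp)]
        simp only [List.reverse_singleton]
        rw [← hjj, ih ([c] :: acc) (fun c' h' => h c' (by simp [h']))]
        simp

theorem pv_split_join (toks : List Char) (h : ∀ c ∈ toks, PySem.Chars.isspace c = false) :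
    PySem.Chars.split₀ (PySem.Chars.join [' '] (toks.map (fun c => [c]))) =
      toks.map (fun c => [c]) := by
  simpa using pv_split_join_aux toks [] h

theorem pv_tokens_eq (e : String)
    (h : ∀ c ∈ (pvShuntA e.toList [] []).1 ++ (pvShuntA e.toList [] []).2,
      PySem.Chars.isspace c = false) :
    (PySem.Str.split₀ (pvToRpA e)).map String.toList =
      ((pvShuntA e.toList [] []).1 ++ (pvShuntA e.toList [] []).2).map (fun c => [c]) := by
  rw [PySem.Str.split₀_map_toList, pvToRpA]
  rw [show (PySem.Str.join " " (((pvShuntA e.toList [] []).1 ++ (pvShuntA e.toList [] []).2).map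
      (fun c => String.ofList [c]))).toList = PySem.Chars.join [' ']
      (((pvShuntA e.toList [] []).1 ++ (pvShuntA e.toList [] []).2).map (fun c => [c])) by
    rw [PySem.Str.toList_join]; simp [Function.comp_def, String.toList_ofList]]
  exact pv_split_join _ h

-- ---- the variable list ----

theorem pv_mem_vars (e : String) (c : Char) (hc : c ∈ e.toList)
    (ha : PySem.Chars.isalpha c = true) : c ∈ pvVarsA e := by
  rw [pvVarsA, PySem.List.mem_sorted, PySem.Set.mem_ofList]
  simp [hc, ha]

theorem pv_vars_len_pos (e : String) (h : e.toList.any PySem.Chars.isalpha = true) :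
    1 ≤ (pvVarsA e).length := by
  rcases List.any_eq_true.mp h with ⟨c, hc, ha⟩
  have := pv_mem_vars e c hc ha
  cases hv : pvVarsA e with
  | nil => rw [hv] at this; simp at this
  | cons _ _ => simp

-- ---- bit-level helpers for the vectorized machine ----

-- the value of row i under bitmask m
def pvBitI (i m : Nat) : Int := if m.testBit i then 1 else 0

-- A's per-row variable values, normalised to Nat bit extractions
def pvBitsI (n i : Nat) : List Int :=
  (List.range n).map (fun j => ((i >>> (n - 1 - j) &&& 1 : Nat) : Int))

theorem pv_shift_and_one (m i : Nat) : (m >>> i) &&& 1 = if m.testBit i then 1 else 0 := by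
  rw [Nat.and_one_is_mod]
  rcases Bool.eq_false_or_eq_true (m.testBit i) with h | h <;> rw [h] <;>
    simp [Nat.testBit, Nat.shiftRight_eq_div_pow] at h ⊢ <;> omega

theorem pv_testBit_full (rows i : Nat) (hi : i < rows) : (1 <<< rows - 1).testBit i = true := by
  rw [Nat.one_shiftLeft, Nat.testBit_two_pow_sub_one]
  simpa using hi

-- bit i of the column mask of variable k
theorem pvColB_testBit (n rows k i : Nat) :
    (pvColB n rows k).testBit i =
      (decide (i < rows) && decide ((i >>> (n - 1 - k)) &&& 1 = 1)) := by
  rw [pvColB]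
  induction rows with
  | zero => simp
  | succ m ih =>
    rw [Nat.fold_succ]
    by_cases hm : (m >>> (n - 1 - k)) &&& 1 = 1
    · rw [if_pos hm, Nat.testBit_or, ih, Nat.one_shiftLeft]
      by_cases him : i = m
      · subst him
        simp [Nat.testBit_two_pow_self, hm]
      · rw [Nat.testBit_two_pow_of_ne (fun h => him h.symm)]
        by_cases hlt : i < m
        · have h2 : i < m + 1 := by omega
          simp [hlt, h2]
        · have h2 : ¬ i < m + 1 := by omega
          simp [hlt, h2]
    · rw [if_neg hm, ih]
      by_cases hlt : i < m
      · have h2 : i < m + 1 := by omega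
        simp [hlt, h2]
      · by_cases him : i = m
        · subst him
          have h3 : decide ((i >>> (n - 1 - k)) &&& 1 = 1) = false := decide_eq_false hm
          rw [h3]
          simp
        · have h2 : ¬ i < m + 1 := by omega
          simp [hlt, h2]

-- entry k of A's per-row value list
theorem pv_bitsI_get (n i k : Nat) (hk : k < n) :
    PySem.List.pyGetD (pvBitsI n i) (k : Int) 0 = ((i >>> (n - 1 - k) &&& 1 : Nat) : Int) := by
  rw [PySem.List.pyGetD, PySem.List.pyGet?_natCast, pvBitsI]
  rw [List.getElem?_map, List.getElem?_range hk]
  rfl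

theorem pv_idxOf?_map_single (c : Char) :
    ∀ vs : List Char, List.idxOf? ([c] : List Char) (vs.map (fun v => [v])) = List.idxOf? c vs := by
  intro vs
  induction vs with
  | nil => rfl
  | cons v rest ih => simp [List.idxOf?_cons, ih]

-- ---- one token: the scalar machine for row i is the bit-i shadow of the mask machine ----

theorem pv_mask_step_corr (n : Nat) (vars : List Char) (hn : n = vars.length)
    (rows : Nat) (i : Nat) (hi : i < rows) (cols : PySem.Dict Char Nat)
    (hcols : ∀ c, cols.get? c = (List.idxOf? c vars).map (fun k => pvColB n rows k))
    (t : Char) (st : List Nat) :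
    pvEvalStepA vars (pvBitsI n i) (st.map (pvBitI i)) [t] =
      (pvMaskStepB (1 <<< rows - 1) cols st t).map (pvBitI i) := by
  have hfull : (1 <<< rows - 1).testBit i = true := pv_testBit_full rows i hi
  by_cases h1 : t = '!'
  · subst h1
    cases st with
    | nil => rfl
    | cons a r =>
      simp only [List.map_cons, pvEvalStepA, pvMaskStepB, reduceIte]
      congr 1
      simp only [pvBitI, Nat.testBit_xor, hfull]
      rcases Bool.eq_false_or_eq_true (a.testBit i) with h | h <;> simp only [h] <;> norm_num
  by_cases h2 : t = '&' ∨ t = '|' ∨ t = '~' ∨ t = '>'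
  · have hA : ([t] = ['&'] ∨ [t] = ['|'] ∨ [t] = ['~'] ∨ [t] = ['>']) := by
      rcases h2 with h | h | h | h <;> simp [h]
    match st with
    | [] =>
      simp only [List.map_nil, pvEvalStepA, pvMaskStepB]
      rw [if_neg (by simp [h1]), if_pos hA, if_neg h1, if_pos ((pv_contains4 t).mpr h2)]
      rfl
    | [x] =>
      simp only [List.map_cons, List.map_nil, pvEvalStepA, pvMaskStepB]
      rw [if_neg (by simp [h1]), if_pos hA, if_neg h1, if_pos ((pv_contains4 t).mpr h2)]
      rfl
    | b :: a :: r =>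
      simp only [List.map_cons, pvEvalStepA, pvMaskStepB]
      rw [if_neg (by simp [h1]), if_pos hA, if_neg h1, if_pos ((pv_contains4 t).mpr h2)]
      simp only [List.map_cons]
      congr 1
      rcases h2 with h | h | h | h <;> subst h <;>
        simp only [reduceIte, Char.reduceEq, pvBitI, Nat.testBit_and, Nat.testBit_or,
          Nat.testBit_xor, hfull] <;>
        rcases Bool.eq_false_or_eq_true (a.testBit i) with ha | ha <;>
        rcases Bool.eq_false_or_eq_true (b.testBit i) with hb | hb <;> simp only [ha, hb] <;>
        norm_num [PySem.Int.band, PySem.Int.bor] <;> decide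
  by_cases h3 : PySem.Chars.isalpha t = true
  · simp only [pvEvalStepA, pvMaskStepB]
    rw [if_neg (by simp [h1]), if_neg (by simpa using h2),
      if_pos (by simp [PySem.Chars.strIsalpha, h3]),
      if_neg h1, if_neg (fun h => h2 ((pv_contains4 t).mp h)), if_pos h3]
    rw [PySem.List.index?, pv_idxOf?_map_single, hcols t]
    cases hk : List.idxOf? t vars with
    | none => simp
    | some k =>
      have hk2 : k < vars.length := (List.idxOf?_eq_some_iff.mp hk).1
      have hkn : k < n := by omega
      simp only [Option.map_some, List.map_cons]
      congr 1
      rw [pv_bitsI_get n i k hkn]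
      rw [pvBitI, pvColB_testBit]
      have : decide (i < rows) = true := by simpa using hi
      rw [this, Bool.true_and]
      by_cases hb : (i >>> (n - 1 - k)) &&& 1 = 1
      · simp [hb]
      · have h0 : (i >>> (n - 1 - k)) &&& 1 = 0 := by
          have := Nat.and_one_is_mod (i >>> (n - 1 - k))
          rcases Nat.mod_two_eq_zero_or_one (i >>> (n - 1 - k)) with h | h <;> omega
        simp [h0]
  · simp only [pvEvalStepA, pvMaskStepB]
    rw [if_neg (by simp [h1]), if_neg (by simpa using h2),
      if_neg (by simp [PySem.Chars.strIsalpha, h3]),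
      if_neg h1, if_neg (fun h => h2 ((pv_contains4 t).mp h)), if_neg h3]

theorem pv_mask_fold_corr (n : Nat) (vars : List Char) (hn : n = vars.length)
    (rows : Nat) (i : Nat) (hi : i < rows) (cols : PySem.Dict Char Nat)
    (hcols : ∀ c, cols.get? c = (List.idxOf? c vars).map (fun k => pvColB n rows k)) :
    ∀ (toks : List Char) (st : List Nat),
      (toks.map (fun c => [c])).foldl (pvEvalStepA vars (pvBitsI n i))
          (st.map (pvBitI i)) =
        (toks.foldl (pvMaskStepB (1 <<< rows - 1) cols) st).map (pvBitI i) := by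
  intro toks
  induction toks with
  | nil => intro st; rfl
  | cons t rest ih =>
    intro st
    simp only [List.map_cons, List.foldl_cons]
    rw [pv_mask_step_corr n vars hn rows i hi cols hcols t st]
    exact ih _

-- A's per-row scalar result is the bit-i read-out of B's table
theorem pv_rpn_eq_table (n : Nat) (vars : List Char) (hn : n = vars.length)
    (rows : Nat) (i : Nat) (hi : i < rows) (cols : PySem.Dict Char Nat)
    (hcols : ∀ c, cols.get? c = (List.idxOf? c vars).map (fun k => pvColB n rows k))
    (toks : List Char) :
    pvEvalRpnA (toks.map (fun c => [c])) (pvBitsI n i) vars =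
      pvBitI i (match toks.foldl (pvMaskStepB (1 <<< rows - 1) cols) [] with
        | [] => 0
        | x :: _ => x) := by
  rw [pvEvalRpnA]
  rw [show ([] : List Int) = ([] : List Nat).map (pvBitI i) from rfl]
  rw [pv_mask_fold_corr n vars hn rows i hi cols hcols toks []]
  cases toks.foldl (pvMaskStepB (1 <<< rows - 1) cols) [] with
  | nil => simp [pvBitI]
  | cons x r => simp

-- ---- format(i, "0nb"): zero-padded binary digits, characterised bit by bit ----

def pvBinSpec (k : Nat) : List Char :=
  if k < 2 then [Nat.digitChar k] else pvBinSpec (k / 2) ++ [Nat.digitChar (k % 2)]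
decreasing_by exact Nat.div_lt_self (by omega) (by omega)

theorem pv_toDigitsCore_acc :
    ∀ (f k : Nat) (l : List Char), Nat.toDigitsCore 2 f k l = Nat.toDigitsCore 2 f k [] ++ l := by
  intro f
  induction f with
  | zero => intro k l; simp [Nat.toDigitsCore]
  | succ f ih =>
    intro k l
    simp only [Nat.toDigitsCore]
    by_cases h : k / 2 = 0
    · simp [h]
    · simp only [if_neg h]
      rw [ih (k / 2) [Nat.digitChar (k % 2)], ih (k / 2) (Nat.digitChar (k % 2) :: l)]
      simp

theorem pv_toDigitsCore_spec :
    ∀ (f k : Nat), k < f → Nat.toDigitsCore 2 f k [] = pvBinSpec k := by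
  intro f
  induction f with
  | zero => omega
  | succ f ih =>
    intro k hk
    simp only [Nat.toDigitsCore]
    by_cases h : k / 2 = 0
    · have hk2 : k < 2 := by omega
      rw [if_pos h, pvBinSpec, if_pos hk2, Nat.mod_eq_of_lt hk2]
    · have hk2 : ¬k < 2 := by omega
      rw [if_neg h, pv_toDigitsCore_acc, ih (k / 2) (by omega)]
      conv_rhs => rw [pvBinSpec]
      rw [if_neg hk2]

theorem pv_toDigits_two (k : Nat) : Nat.toDigits 2 k = pvBinSpec k :=
  pv_toDigitsCore_spec (k + 1) k (by omega)

theorem pvBinSpec_chars : ∀ k c, c ∈ pvBinSpec k → c = '0' ∨ c = '1' := by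
  intro k
  induction k using pvBinSpec.induct with
  | case1 k hk =>
    intro c hc
    rw [pvBinSpec, if_pos hk] at hc
    interval_cases k <;> simp [Nat.digitChar] at hc <;> simp [hc]
  | case2 k hk ih =>
    intro c hc
    rw [pvBinSpec, if_neg hk] at hc
    rcases List.mem_append.mp hc with h | h
    · exact ih c h
    · have h2 := Nat.mod_two_eq_zero_or_one k
      rcases h2 with h2 | h2 <;> rw [h2] at h <;> simp_all [Nat.digitChar]

theorem pvBinSpec_ne_nil (k : Nat) : pvBinSpec k ≠ [] := by
  rw [pvBinSpec]
  split <;> simp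

theorem pvBinSpec_len : ∀ (n k : Nat), k < 2 ^ n → 1 ≤ n → (pvBinSpec k).length ≤ n := by
  intro n
  induction n with
  | zero => omega
  | succ n ih =>
    intro k hk _
    by_cases h : k < 2
    · rw [pvBinSpec, if_pos h]; simp
    · have hn : 1 ≤ n := by
        by_contra hn
        have : n = 0 := by omega
        subst this
        simp at hk
        omega
      rw [pvBinSpec, if_neg h]
      have : (pvBinSpec (k / 2)).length ≤ n := by
        refine ih (k / 2) ?_ hn
        have := Nat.pow_succ 2 n
        omega
      simp [this]

theorem pv_zfill_binary (cs : List Char) (n : Nat) (hne : cs ≠ [])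
    (hc : ∀ c ∈ cs, c = '0' ∨ c = '1') :
    PySem.Chars.zfill cs (n : Int) = List.replicate (n - cs.length) '0' ++ cs := by
  by_cases h : (n : Int) ≤ (cs.length : Int)
  · rw [PySem.Chars.zfill.eq_def, if_pos h]
    have : n - cs.length = 0 := by omega
    simp [this]
  · cases cs with
    | nil => simp at hne
    | cons c rest =>
      have hpm : ¬(c = '+' ∨ c = '-') := by
        rcases hc c (by simp) with h' | h' <;> simp [h']
      simp only [PySem.Chars.zfill.eq_def, if_neg h, if_neg hpm, Int.toNat_natCast]

theorem pv_padBin :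
    ∀ (n k : Nat), 1 ≤ n → k < 2 ^ n →
      PySem.Chars.zfill (pvBinSpec k) (n : Int) =
        (List.range n).map (fun j => if k >>> (n - 1 - j) &&& 1 = 1 then '1' else '0') := by
  intro n
  induction n with
  | zero => omega
  | succ n ih =>
    intro k _ hk
    by_cases hn : 1 ≤ n
    · by_cases hsm : k < 2 ^ n
      · -- leading digit '0'
        have hlen : (pvBinSpec k).length ≤ n := pvBinSpec_len n k hsm hn
        rw [pv_zfill_binary _ _ (pvBinSpec_ne_nil k) (pvBinSpec_chars k)]
        have harith : n + 1 - (pvBinSpec k).length = (n - (pvBinSpec k).length) + 1 := by omega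
        rw [harith, List.replicate_succ, List.cons_append]
        have hih := ih k hn hsm
        rw [pv_zfill_binary _ _ (pvBinSpec_ne_nil k) (pvBinSpec_chars k)] at hih
        rw [hih]
        rw [List.range_succ_eq_map, List.map_cons]
        simp only [Nat.add_sub_cancel, Nat.sub_zero]
        have h0 : k >>> n &&& 1 = 0 := by
          rw [Nat.shiftRight_eq_div_pow, Nat.div_eq_of_lt hsm]
          decide
        rw [h0, if_neg (by norm_num), List.map_map]
        congr 1
        apply List.map_congr_left
        intro j hj
        have e : n - (j + 1) = n - 1 - j := by omega
        simp [e]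
      · -- leading digit '1'
        have hk2 : ¬k < 2 := by
          have : 2 ≤ 2 ^ n := Nat.one_lt_two_pow_iff.mpr (by omega)
          omega
        have hdiv : k / 2 < 2 ^ n := by
          have := Nat.pow_succ 2 n
          omega
        rw [pvBinSpec, if_neg hk2]
        rw [pv_zfill_binary _ _ (by simp) (by
          intro c hc
          rcases List.mem_append.mp hc with h | h
          · exact pvBinSpec_chars _ c h
          · have hd : Nat.digitChar (k % 2) = '0' ∨ Nat.digitChar (k % 2) = '1' := by
              rcases Nat.mod_two_eq_zero_or_one k with h2 | h2 <;> rw [h2] <;> simp [Nat.digitChar]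
            simp only [List.mem_singleton] at h
            rw [h]
            exact hd)]
        have hlen : (pvBinSpec (k / 2)).length ≤ n := pvBinSpec_len n (k / 2) hdiv hn
        have harith : n + 1 - (pvBinSpec (k / 2) ++ [Nat.digitChar (k % 2)]).length =
            n - (pvBinSpec (k / 2)).length := by simp only [List.length_append, List.length_cons, List.length_nil]; omega
        rw [harith, ← List.append_assoc]
        have hih := ih (k / 2) hn hdiv
        rw [pv_zfill_binary _ _ (pvBinSpec_ne_nil _) (pvBinSpec_chars _)] at hih
        rw [hih, List.range_succ, List.map_append]
        congr 1
        · apply List.map_congr_left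
          intro j hj
          have hj' : j < n := List.mem_range.mp hj
          have e1 : n + 1 - 1 - j = (n - 1 - j) + 1 := by omega
          rw [e1]
          have e2 : k >>> (n - 1 - j + 1) = (k / 2) >>> (n - 1 - j) := by
            rw [Nat.shiftRight_eq_div_pow, Nat.shiftRight_eq_div_pow, pow_succ]
            rw [Nat.mul_comm, ← Nat.div_div_eq_div_mul]
          rw [e2]
        · simp only [List.map_cons, List.map_nil, Nat.add_sub_cancel, Nat.sub_self,
            Nat.shiftRight_zero, Nat.and_one_is_mod]
          rcases Nat.mod_two_eq_zero_or_one k with h2 | h2 <;> rw [h2] <;> simp [Nat.digitChar]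
    · -- n = 0: a single digit
      have hn0 : n = 0 := by omega
      subst hn0
      have hk1 : k < 2 := by simpa using hk
      interval_cases k
      · have h1 : pvBinSpec 0 = ['0'] := by rw [pvBinSpec]; norm_num [Nat.digitChar]
        rw [h1, pv_zfill_binary _ _ (by simp) (by intro c hc; simp at hc; simp [hc])]
        decide
      · have h1 : pvBinSpec 1 = ['1'] := by rw [pvBinSpec]; norm_num [Nat.digitChar]
        rw [h1, pv_zfill_binary _ _ (by simp) (by intro c hc; simp at hc; simp [hc])]
        decide

-- ---- ranges, enumerate, and the per-row bit list ----

theorem pv_pyRange_up (N : Nat) :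
    PySem.List.pyRange 0 (N : Int) 1 = (List.range N).map (fun (k : Nat) => (k : Int)) := by
  rw [PySem.List.pyRange]
  rw [if_neg (by norm_num)]
  cases N with
  | zero => rw [if_pos (by norm_num), if_neg (by norm_num)]; simp
  | succ m =>
    rw [if_pos (by norm_num), if_pos (by push_cast; omega)]
    have h : ((m + 1 : Nat) : Int) - 0 + 1 - 1 = ((m + 1 : Nat) : Int) := by push_cast; ring
    rw [h, Int.ediv_one, Int.toNat_natCast]
    simp

theorem pv_pyRange_down (n : Nat) :
    PySem.List.pyRange ((n : Int) - 1) (-1) (-1) =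
      (List.range n).map (fun (k : Nat) => ((n - 1 - k : Nat) : Int)) := by
  rw [PySem.List.pyRange]
  rw [if_neg (by norm_num), if_neg (by norm_num)]
  cases n with
  | zero => rw [if_neg (by norm_num)]; simp
  | succ m =>
    rw [if_pos (by push_cast; omega)]
    have h : ((m + 1 : Nat) : Int) - 1 - -1 + -(-1) - 1 = ((m + 1 : Nat) : Int) := by push_cast; ring
    rw [h]
    have hc : ((((m + 1 : Nat) : Int)) / - -1).toNat = m + 1 := by norm_num
    rw [hc]
    apply List.map_congr_left
    intro j hj
    have hj' : j < m + 1 := List.mem_range.mp hj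
    push_cast
    omega

theorem pv_bits_eq (n k : Nat) (i : Int) (hi : i = (k : Int)) :
    (PySem.List.pyRange ((n : Int) - 1) (-1) (-1)).map
        (fun j => PySem.Int.band
          (@HShiftRight.hShiftRight Int Nat Int Int.instHShiftRightNat i j.toNat) 1) =
      pvBitsI n k := by
  subst hi
  rw [pv_pyRange_down, pvBitsI, List.map_map]
  apply List.map_congr_left
  intro j _
  simp only [Function.comp_apply, Int.toNat_natCast]
  have hsh : @HShiftRight.hShiftRight Int Nat Int Int.instHShiftRightNat ((k : Nat) : Int)
      ((n - 1 - j : Nat)) = ((k >>> (n - 1 - j) : Nat) : Int) := rfl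
  rw [hsh, show (1 : Int) = ((1 : Nat) : Int) from rfl, PySem.Int.band_natCast]

theorem pv_enum_cons {α : Type} (x : α) (xs : List α) (s : Int) :
    PySem.List.enumerate (x :: xs) s = (s, x) :: PySem.List.enumerate xs (s + 1) := rfl

theorem pv_enum_map_range' {α : Type} (f : Nat → α) :
    ∀ (N s : Nat), PySem.List.enumerate ((List.range' s N).map f) (s : Int) =
      (List.range' s N).map (fun (k : Nat) => ((k : Int), f k)) := by
  intro N
  induction N with
  | zero => intro s; rfl
  | succ N ih =>
    intro s
    rw [List.range'_succ, List.map_cons, List.map_cons, pv_enum_cons]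
    rw [show ((s : Int) + 1) = ((s + 1 : Nat) : Int) by push_cast; ring]
    rw [ih (s + 1)]

theorem pv_enum_map_range {α : Type} (f : Nat → α) (N : Nat) :
    PySem.List.enumerate ((List.range N).map f) 0 =
      (List.range N).map (fun (k : Nat) => ((k : Int), f k)) := by
  have := pv_enum_map_range' f N 0
  simpa [List.range_eq_range'] using this

-- ---- the two per-row clauses agree ----

theorem pv_toBinChars_natCast (k : Nat) :
    PySem.Int.toBinChars ((k : Nat) : Int) = pvBinSpec k := by
  rw [PySem.Int.toBinChars, if_neg (by omega), Int.toNat_natCast, pv_toDigits_two]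

theorem pv_terms_eq (vs : List Char) (n k : Nat) (hn : n = vs.length) (hn1 : 1 ≤ n)
    (hk : k < 2 ^ n) :
    (PySem.List.enumerate
        (PySem.Chars.zfill (PySem.Int.toBinChars ((k : Nat) : Int)) ((n : Int))) 0).map
        (fun jv => if jv.2 = '1' then '!' :: [PySem.List.pyGetD vs jv.1 ' ']
          else [PySem.List.pyGetD vs jv.1 ' ']) =
      vs.zipIdx.map (fun vk =>
        if (k >>> (n - 1 - vk.2)) &&& 1 = 1 then '!' :: [vk.1] else [vk.1]) := by
  rw [pv_toBinChars_natCast, pv_padBin n k hn1 hk, pv_enum_map_range, List.map_map]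
  apply List.ext_getElem
  · simp [hn]
  intro j hj1 hj2
  have hjn : j < n := by simpa using hj1
  have hjv : j < vs.length := by omega
  have hget : PySem.List.pyGetD vs (j : Int) ' ' = vs[j] := by
    rw [PySem.List.pyGetD, PySem.List.pyGet?_natCast, List.getElem?_eq_getElem hjv]
    rfl
  simp only [List.getElem_map, List.getElem_range, List.getElem_zipIdx, Function.comp_apply, hget]
  have : k >>> (n - 1 - j) &&& 1 = 0 ∨ k >>> (n - 1 - j) &&& 1 = 1 := by
    rw [Nat.and_one_is_mod]; omega
  rcases this with h | h <;> rw [h] <;> simp <;> simpa [Nat.and_one_is_mod] using h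

-- ===== VERDICT (by name: the statement is the Claim_ definition above) =====
set_option maxHeartbeats 1600000 in
theorem find_skcnf_spec : Claim_equal_find_skcnf := by
  unfold Claim_equal_find_skcnf
  intro e _ hpre
  unfold Spec_find_skcnf
  obtain ⟨halpha, -⟩ := hpre
  have hvB : PySem.List.sorted (PySem.Set.ofList (e.toList.filter PySem.Chars.isalpha))
      (fun x => x) false = pvVarsA e := rfl
  have hn1 : 1 ≤ (pvVarsA e).length := pv_vars_len_pos e halpha
  have hinv : ∀ x ∈ (pvShuntA e.toList [] []).1 ++ (pvShuntA e.toList [] []).2,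
      pvTokInv (fun c => c ∈ e.toList) x := by
    intro x hx
    refine pvShuntA_inv (fun c => c ∈ e.toList) e.toList [] [] (fun c hc _ => hc)
      (by intro c hc; simp at hc) (by intro c hc; simp at hc) x ?_
    rcases List.mem_append.mp hx with h | h
    · exact Or.inl h
    · exact Or.inr h
  have hspace : ∀ c ∈ (pvShuntA e.toList [] []).1 ++ (pvShuntA e.toList [] []).2,
      PySem.Chars.isspace c = false := fun c hc => pvTokInv_not_space _ c (hinv c hc)
  have htok := pv_tokens_eq e hspace
  have hpostfix : pvPostfixB e.toList =
      (pvShuntA e.toList [] []).1 ++ (pvShuntA e.toList [] []).2 := by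
    rw [pvPostfixB, pvScanB_eq]
  set n := (pvVarsA e).length with hn
  set rows := 1 <<< n with hrowsdef
  have hrows : rows = 2 ^ n := by rw [hrowsdef, Nat.one_shiftLeft]
  set colsD := (pvVarsA e).zipIdx.foldl
    (fun d vk => d.insert vk.1 (pvColB n rows vk.2)) PySem.Dict.empty with hcolsD
  -- the column dictionary looks up the variable's index
  have hvN : (pvVarsA e).Nodup := by
    rw [pvVarsA]
    exact ((PySem.List.sorted_perm _ _ _).nodup_iff).mpr (PySem.Set.nodup_ofList _)
  have hfst : (pvVarsA e).zipIdx.map Prod.fst = pvVarsA e := by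
    apply List.ext_getElem
    · simp
    · intro j h1 h2
      simp
  have hitems : colsD.items =
      (pvVarsA e).zipIdx.map (fun vk => (vk.1, pvColB n rows vk.2)) := by
    rw [hcolsD]
    have := PySem.Dict.items_foldl_insert_fresh (pvVarsA e).zipIdx Prod.fst
      (fun vk => pvColB n rows vk.2) PySem.Dict.empty
      (by intro a _; simp [PySem.Dict.contains_empty]) (by rw [hfst]; exact hvN)
    simpa using this
  have hkeys : colsD.keys = pvVarsA e := by
    rw [PySem.Dict.keys, hitems, List.map_map]
    exact hfst
  have hcols : ∀ c, colsD.get? c =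
      (List.idxOf? c (pvVarsA e)).map (fun k => pvColB n rows k) := by
    intro c
    cases hidx : List.idxOf? c (pvVarsA e) with
    | none =>
      have hnm : c ∉ pvVarsA e := by
        intro hmem
        have := List.isSome_idxOf?.mpr hmem
        rw [hidx] at this
        simp at this
      rw [(PySem.Dict.get?_eq_none_iff_not_mem_keys colsD c).mpr (by rw [hkeys]; exact hnm)]
      rfl
    | some k =>
      obtain ⟨hk, hvk, -⟩ := List.idxOf?_eq_some_iff.mp hidx
      have hmem : (c, pvColB n rows k) ∈ colsD.items := by
        rw [hitems]
        refine List.mem_map.mpr ⟨((pvVarsA e)[k], k), ?_, by rw [hvk]⟩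
        exact List.mem_iff_getElem.mpr ⟨k, by simpa using hk, by simp⟩
      rw [PySem.Dict.get?_of_mem_items colsD hmem (by rw [hkeys]; exact hvN)]
      rfl
  set table := (match ((pvShuntA e.toList [] []).1 ++ (pvShuntA e.toList [] []).2).foldl
      (pvMaskStepB (1 <<< rows - 1) colsD) [] with
    | [] => 0
    | x :: _ => x) with htable
  -- A's outcome list is the row-wise read-out of B's table
  have hout : pvEvalExprA e = (List.range rows).map (fun k => pvBitI k table) := by
    rw [pvEvalExprA]
    rw [show ((2 : Int) ^ (pvVarsA e).length) = ((rows : Nat) : Int) by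
      rw [hrows, ← hn]; push_cast; ring]
    rw [pv_pyRange_up rows, List.map_map]
    apply List.map_congr_left
    intro k hk
    have hkN : k < rows := List.mem_range.mp hk
    dsimp only [Function.comp]
    rw [htok]
    rw [pv_bits_eq n k ((k : Nat) : Int) rfl]
    rw [pv_rpn_eq_table n (pvVarsA e) hn rows k hkN colsD hcols]
  simp only [find_skcnf, find_skcnf_alt, hvB, hpostfix, ← hn, ← hrowsdef, ← hcolsD,
    ← htable, hout]
  clear_value table
  clear_value colsD
  refine congrArg (fun L => if L = [] then ("1" : String)
    else String.ofList (List.intercalate (' ' :: '&' :: [' ']) L)) ?_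
  have hB := PySem.List.foldl_append_if (fun i => decide ((table >>> i) &&& 1 = 0))
    (fun i => ['('] ++ List.intercalate (' ' :: '|' :: [' '])
      ((pvVarsA e).zipIdx.map (fun vk =>
        if (i >>> (n - 1 - vk.2)) &&& 1 = 1 then '!' :: [vk.1] else [vk.1])) ++ [')'])
    (List.range rows) []
  rw [List.nil_append] at hB
  rw [← hB]
  rw [pv_enum_map_range, List.foldl_map]
  refine PySem.List.foldl_congr_mem _ _ _ _ ?_
  intro acc k hk
  have hkN2 : k < 2 ^ n := by
    have := List.mem_range.mp hk
    omega
  have hcond : (pvBitI k table = 0) ↔ ((table >>> k) &&& 1 = 0) := by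
    rw [pvBitI, pv_shift_and_one]
    cases table.testBit k <;> simp
  by_cases hz : pvBitI k table = 0
  · rw [if_pos (show (((k : Nat) : Int), pvBitI k table).2 = 0 from hz),
      if_pos (show decide ((table >>> k) &&& 1 = 0) = true from decide_eq_true (hcond.mp hz))]
    refine congrArg (fun t => acc ++
      [['('] ++ List.intercalate (' ' :: '|' :: [' ']) t ++ [')']]) ?_
    exact pv_terms_eq (pvVarsA e) n k hn hn1 hkN2
  · rw [if_neg (show ¬ (((k : Nat) : Int), pvBitI k table).2 = 0 from hz),
      if_neg (show ¬ decide ((table >>> k) &&& 1 = 0) = true from by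
        simp only [decide_eq_true_eq]
        exact fun h => hz (hcond.mpr h))]
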